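-- pv_equiv track=rewrite | github.com/lingerun/daguan_competition_2019 | bert_master/datagrand/utils_daguan.py | get_BIO_label
-- ===== SOURCE A (Python) =====
-- def get_BIO_label(item):
--     str_label = []
--     label = item[-1]
--     item = item[:-2]
--     chars = item.split('_')
--     if label == 'o':
--         for char in chars:
--             str_label.append(char + ' ' + label + '\n')
--     else:
--         str_label.append(chars[0]+' B_'+label+'\n')
--         # for char in chars[1:]:
--         #     str_label.append(char+' I_'+label+'\n')
--         #使用BIEO标记
--         for char in chars[1:-1]:
--             str_label.append(char+' I_'+label+'\n')
--         #实体只有一个字符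
--         if len(chars[0:]) > 1:
--             str_label.append(chars[-1] + ' E_' + label + '\n')
--
--     return str_label
-- ===== SOURCE B (Python) =====
-- def get_BIO_label(item):
--     label = item[-1]
--     chars = item[:-2].split('_')
--     if label == 'o':
--         return [c + ' ' + label + '\n' for c in chars]
--
--     def rest(cs):
--         # recursion on the token list: the lone remaining token is the end (E_),
--         # any earlier one is interior (I_)
--         if not cs:
--             return []
--         if len(cs) == 1:
--             return [cs[0] + ' E_' + label + '\n']
--         return [cs[0] + ' I_' + label + '\n'] + rest(cs[1:])
--
--     return [chars[0] + ' B_' + label + '\n'] + rest(chars[1:])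
-- ===== Notes on version B (the rewrite author's own statement) =====
-- stated objective: alternative
-- what changed: A builds the entity labels by three region-specific steps over slices (append a B_ line for chars[0], loop over chars[1:-1] for I_ lines, conditionally append an E_ line for chars[-1]); B instead consumes the token list by structural recursion: a helper that tags the lone remaining token E_ and any earlier one I_, with the B_ line prepended, so no slicing or length-based conditional append occurs.
import Mathlib
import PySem

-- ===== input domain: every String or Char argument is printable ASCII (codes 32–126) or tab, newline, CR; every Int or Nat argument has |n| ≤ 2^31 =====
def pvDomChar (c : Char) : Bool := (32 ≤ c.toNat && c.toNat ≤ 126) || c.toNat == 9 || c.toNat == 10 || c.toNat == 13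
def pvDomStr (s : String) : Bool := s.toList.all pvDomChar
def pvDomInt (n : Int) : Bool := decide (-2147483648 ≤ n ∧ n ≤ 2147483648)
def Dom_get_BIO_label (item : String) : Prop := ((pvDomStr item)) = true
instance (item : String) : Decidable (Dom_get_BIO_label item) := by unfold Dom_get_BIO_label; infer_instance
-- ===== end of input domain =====

-- B replaces A's three region-specific slice steps (first append, middle slice loop, conditional
-- last append) with structural recursion on the token list; objective: alternative decomposition.

-- ===== PORT A =====
-- the else-branch of A: B_ line for chars[0], I_ lines for chars[1:-1], E_ line for chars[-1] when len > 1
def pvALines (label : String) (chars : List String) : List String :=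
  match chars with
  | [] => []   -- unreachable: str.split never returns an empty list
  | c0 :: _ =>
    let init := [c0 ++ " B_" ++ label ++ "\n"]
    let mid := (PySem.List.slice chars (some 1) (some (-1))).foldl
        (fun acc c => acc ++ [c ++ " I_" ++ label ++ "\n"]) init
    if 1 < chars.length then
      mid ++ [((PySem.List.pyGet? chars (-1)).getD "") ++ " E_" ++ label ++ "\n"]
    else mid

def get_BIO_label (item : String) : List String :=
  match PySem.Str.pyGet? item (-1) with
  | none => []           -- item[-1] raises IndexError on "": excluded by Pre_
  | some lc =>
    let label := String.ofList [lc]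
    let item2 := PySem.Str.slice item none (some (-2))
    let chars := (PySem.Str.split? item2 "_").getD []   -- sep ≠ "", so split? is always some
    if label == "o" then
      chars.foldl (fun acc c => acc ++ [c ++ " " ++ label ++ "\n"]) []
    else pvALines label chars

-- ===== PORT B =====
-- recursion on the token list: the lone remaining token is E_, any earlier one I_
def pvBRest (label : String) : List String → List String
  | [] => []
  | [c] => [c ++ " E_" ++ label ++ "\n"]
  | c :: c' :: cs => (c ++ " I_" ++ label ++ "\n") :: pvBRest label (c' :: cs)

def get_BIO_label_alt (item : String) : List String :=
  match PySem.Str.pyGet? item (-1) with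
  | none => []           -- item[-1] raises IndexError on "": excluded by Pre_
  | some lc =>
    let label := String.ofList [lc]
    let chars := (PySem.Str.split? (PySem.Str.slice item none (some (-2))) "_").getD []
    if label == "o" then chars.map (fun c => c ++ " " ++ label ++ "\n")
    else match chars with
      | [] => []         -- unreachable: str.split never returns an empty list
      | c0 :: rest => (c0 ++ " B_" ++ label ++ "\n") :: pvBRest label rest

-- ===== PRECONDITION & SPEC =====
-- Pre_ excludes only the empty string, on which A's item[-1] raises IndexError.
def Pre_get_BIO_label (item : String) : Prop := item ≠ ""
instance (item : String) : Decidable (Pre_get_BIO_label item) := by unfold Pre_get_BIO_label; infer_instance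
def pvWitness_get_BIO_label : String := "10_20/a"

def Spec_get_BIO_label (item : String) (out : List String) : Prop := out = get_BIO_label_alt item
instance (item : String) (out : List String) : Decidable (Spec_get_BIO_label item out) := by unfold Spec_get_BIO_label; infer_instance

-- ===== CLAIM (what is proved, stated in full; the proofs are below) =====
def Claim_equal_get_BIO_label : Prop := ∀ (item : String), Dom_get_BIO_label item → Pre_get_BIO_label item → Spec_get_BIO_label item (get_BIO_label item)

-- ===== LEMMAS AND PROOFS =====

lemma pv_foldl_app {α β : Type} (g : α → β) (l : List α) (init : List β) :
    l.foldl (fun acc c => acc ++ [g c]) init = init ++ l.map g := by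
  induction l generalizing init with
  | nil => simp
  | cons x xs ih => simp [List.foldl, ih]

lemma pv_slice_mid {α : Type} (c0 y : α) (ys : List α) :
    PySem.List.slice (c0 :: (ys ++ [y])) (some 1) (some (-1)) = ys := by
  simp [PySem.List.slice, PySem.List.clampIdx]
  rw [if_neg (by omega)]
  simp

lemma pv_rest (label y : String) (ys : List String) :
    pvBRest label (ys ++ [y]) = ys.map (fun c => c ++ " I_" ++ label ++ "\n") ++ [y ++ " E_" ++ label ++ "\n"] := by
  induction ys with
  | nil => rfl
  | cons x xs ih =>
    cases xs with
    | nil => simp [pvBRest]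
    | cons z zs =>
      simp only [List.cons_append] at ih
      simp [pvBRest, ih]

lemma pv_core (label : String) (chars : List String) :
    pvALines label chars
      = match chars with
        | [] => []
        | c0 :: rest => (c0 ++ " B_" ++ label ++ "\n") :: pvBRest label rest := by
  match chars with
  | [] => rfl
  | c0 :: rest =>
    rcases rest.eq_nil_or_concat with h | ⟨ys, y, h⟩
    · subst h
      simp [pvALines, pvBRest, PySem.List.slice, PySem.List.clampIdx]
    · simp only [List.concat_eq_append] at h
      subst h
      simp only [pvALines]
      rw [pv_slice_mid, pv_foldl_app, pv_rest]
      have hlast : PySem.List.pyGet? (c0 :: (ys ++ [y])) (-1) = some y := by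
        rw [PySem.List.pyGet?_neg_one, show (c0 :: (ys ++ [y])) = (c0 :: ys) ++ [y] from rfl,
            List.getLast?_concat]
      rw [hlast]
      rw [if_pos (by simp)]
      simp

-- ===== VERDICT (by name: the statement is the Claim_ definition above) =====
theorem get_BIO_label_spec : Claim_equal_get_BIO_label := by
  intro item _ _
  unfold Spec_get_BIO_label get_BIO_label get_BIO_label_alt
  cases h : PySem.Str.pyGet? item (-1) with
  | none => rfl
  | some lc =>
    dsimp only
    by_cases hl : (String.ofList [lc] == "o") = true
    · rw [if_pos hl, if_pos hl, pv_foldl_app]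
      simp
    · rw [if_neg hl, if_neg hl]
      exact pv_core _ _
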